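-- pv_equiv track=rewrite | github.com/johanndaflon/Zomboid-translations | Zomboid_sync_translation_files.py | sync_keys
-- ===== SOURCE A (Python) =====
-- def sync_keys(en_data, target_data):
--     """
--     Garante:
--     - mesmas chaves do EN
--     - mesma ordem
--     - mantém tradução existente
--     - adiciona faltantes com valor do EN
--     """
--     result = {}
--     added = 0
--
--     for key in en_data:
--         if key in target_data:
--             result[key] = target_data[key]  # mantém tradução
--         else:
--             result[key] = en_data[key]      # fallback EN
--             added += 1
--
--     return result, added
-- ===== SOURCE B (Python) =====
-- def sync_keys(en_data, target_data):
--     # Copy EN first (preserves EN key order and fallback values), then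
--     # overwrite with existing translations by looping over target_data;
--     # the added-count comes from key-set difference.
--     result = dict(en_data)
--     for key, value in target_data.items():
--         if key in result:
--             result[key] = value
--     added = len(en_data.keys() - target_data.keys())
--     return result, added
-- ===== Notes on version B (the rewrite author's own statement) =====
-- stated objective: alternative
-- what changed: B copies en_data wholesale and then loops over target_data overwriting existing translations, computing the added-count via key-set difference, instead of A's single loop over en_data that builds the result key by key with a branch counter.
import Mathlib
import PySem

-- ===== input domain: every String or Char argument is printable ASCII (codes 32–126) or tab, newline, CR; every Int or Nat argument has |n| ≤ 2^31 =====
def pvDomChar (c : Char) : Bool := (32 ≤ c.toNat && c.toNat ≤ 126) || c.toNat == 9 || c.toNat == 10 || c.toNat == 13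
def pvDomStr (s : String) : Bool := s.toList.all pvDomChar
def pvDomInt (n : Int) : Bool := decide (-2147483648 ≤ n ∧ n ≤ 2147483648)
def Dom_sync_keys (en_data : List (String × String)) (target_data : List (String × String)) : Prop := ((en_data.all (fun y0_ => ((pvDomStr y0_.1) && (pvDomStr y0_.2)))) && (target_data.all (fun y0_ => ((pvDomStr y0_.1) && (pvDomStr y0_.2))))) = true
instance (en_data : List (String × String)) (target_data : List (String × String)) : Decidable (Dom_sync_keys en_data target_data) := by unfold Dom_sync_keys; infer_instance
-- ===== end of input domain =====

-- B copies en_data wholesale and then overwrites from target_data, counting additions by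
-- key-set difference, instead of A's single key-by-key loop over en_data with a branch counter.

-- ===== PORT A =====
def sync_keys (en_data : List (String × String)) (target_data : List (String × String)) : (List (String × String)) × Int :=
  let tD := PySem.Dict.mk target_data   -- the dict argument target_data
  let eD := PySem.Dict.mk en_data       -- the dict argument en_data
  let st := en_data.foldl               -- for key in en_data:
    (fun (st : PySem.Dict String String × Int) kv =>
      if tD.contains kv.1 then
        (st.1.insert kv.1 (tD.getD kv.1 ""), st.2)        -- result[key] = target_data[key]
      else
        (st.1.insert kv.1 (eD.getD kv.1 ""), st.2 + 1))   -- result[key] = en_data[key]; added += 1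
    (PySem.Dict.empty, 0)
  (st.1.items, st.2)

-- ===== PORT B =====
def sync_keys_alt (en_data : List (String × String)) (target_data : List (String × String)) : (List (String × String)) × Int :=
  let result := target_data.foldl        -- for key, value in target_data.items():
    (fun (r : PySem.Dict String String) kv =>
      if r.contains kv.1 then r.insert kv.1 kv.2 else r)
    (PySem.Dict.mk en_data)              -- result = dict(en_data)
  -- len(en_data.keys() - target_data.keys()): exact for dict key views (keys are unique)
  let added := ((en_data.map Prod.fst).filter
    (fun k => !((target_data.map Prod.fst).contains k))).length
  (result.items, (added : Int))

-- ===== PRECONDITION & SPEC =====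
-- The arguments are Python dicts, whose keys are unique by construction; Pre_ states exactly
-- that the association lists encode dicts (no duplicate keys). No dict input is excluded.
def Pre_sync_keys (en_data : List (String × String)) (target_data : List (String × String)) : Prop :=
  (en_data.map Prod.fst).Nodup ∧ (target_data.map Prod.fst).Nodup
instance (en_data : List (String × String)) (target_data : List (String × String)) : Decidable (Pre_sync_keys en_data target_data) := by unfold Pre_sync_keys; infer_instance
def pvWitness_sync_keys : (List (String × String)) × (List (String × String)) :=
  ([("a", "Hello"), ("b", "World")], [("a", "Bonjour")])

def Spec_sync_keys (en_data : List (String × String)) (target_data : List (String × String)) (out : (List (String × String)) × Int) : Prop := out = sync_keys_alt en_data target_data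
instance (en_data : List (String × String)) (target_data : List (String × String)) (out : (List (String × String)) × Int) : Decidable (Spec_sync_keys en_data target_data out) := by unfold Spec_sync_keys; infer_instance

-- ===== CLAIM (what is proved, stated in full; the proofs are below) =====
def Claim_equal_sync_keys : Prop := ∀ (en_data : List (String × String)) (target_data : List (String × String)), Dom_sync_keys en_data target_data → Pre_sync_keys en_data target_data → Spec_sync_keys en_data target_data (sync_keys en_data target_data)

-- ===== LEMMAS AND PROOFS =====

-- A's loop splits into a dict-building fold and a count of EN keys missing from the target.
theorem pvA_fold (tD eD : PySem.Dict String String) (l : List (String × String))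
    (d : PySem.Dict String String) (a : Int) :
    l.foldl (fun (st : PySem.Dict String String × Int) kv =>
      if tD.contains kv.1 then (st.1.insert kv.1 (tD.getD kv.1 ""), st.2)
      else (st.1.insert kv.1 (eD.getD kv.1 ""), st.2 + 1)) (d, a)
    = (l.foldl (fun r kv => r.insert kv.1
        (if tD.contains kv.1 then tD.getD kv.1 "" else eD.getD kv.1 "")) d,
       a + ((l.filter (fun kv => !tD.contains kv.1)).length : Int)) := by
  induction l generalizing d a with
  | nil => simp
  | cons kv rest ih =>
    by_cases h : tD.contains kv.1 = true
    · simp [List.foldl_cons, h, ih]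
    · simp only [Bool.not_eq_true] at h
      simp [List.foldl_cons, h, ih]
      omega

-- B's overwriting loop rewrites each entry of r to its (first-match) value in l, if any.
theorem pvB_fold (l : List (String × String)) (hl : (l.map Prod.fst).Nodup)
    (r : PySem.Dict String String) :
    (l.foldl (fun r kv => if r.contains kv.1 then r.insert kv.1 kv.2 else r) r).items
    = r.items.map (fun p => match (PySem.Dict.mk l).get? p.1 with
        | some w => (p.1, w) | none => p) := by
  induction l generalizing r with
  | nil =>
    simp [PySem.Dict.get?]
  | cons kv rest ih =>
    obtain ⟨k, v⟩ := kv
    have hl' := hl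
    rw [List.map_cons, List.nodup_cons] at hl'
    obtain ⟨hk, hrest⟩ := hl'
    by_cases hc : r.contains k = true
    · rw [List.foldl_cons]
      simp only [hc, if_true]
      rw [ih hrest, PySem.Dict.items_insert_of_contains _ _ hc, List.map_map]
      refine List.map_congr_left ?_
      intro p _
      by_cases hpk : p.1 = k
      · have hnone : (PySem.Dict.mk rest).get? k = none := by
          rw [PySem.Dict.get?_eq_none_iff_not_mem_keys]
          simpa [PySem.Dict.keys_mk] using hk
        simp [Function.comp, PySem.Dict.get?_mk_cons, hpk, hnone]
      · simp [Function.comp, PySem.Dict.get?_mk_cons, hpk, Ne.symm hpk]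
    · rw [List.foldl_cons]
      simp only [hc, if_false, Bool.false_eq_true]
      rw [ih hrest]
      refine List.map_congr_left ?_
      intro p hp
      have hpk : p.1 ≠ k := by
        intro he
        have hmem : p.1 ∈ r.keys := PySem.Dict.mem_keys_of_mem_items r hp
        rw [he, ← PySem.Dict.contains_iff_mem_keys] at hmem
        exact hc hmem
      simp [PySem.Dict.get?_mk_cons, Ne.symm hpk]

-- ===== VERDICT (by name: the statement is the Claim_ definition above) =====
theorem sync_keys_spec : Claim_equal_sync_keys := by
  intro en t _ hpre
  obtain ⟨hen, ht⟩ := hpre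
  unfold Spec_sync_keys sync_keys sync_keys_alt
  simp only []
  rw [pvA_fold]
  rw [PySem.Dict.items_foldl_insert_fresh _ _ _ _ (by intro a _; simp) hen]
  rw [pvB_fold t ht]
  refine Prod.ext ?_ ?_
  · show [] ++ _ = _
    rw [List.nil_append]
    show _ = List.map _ en
    refine List.map_congr_left ?_
    intro p hp
    rcases hg : (PySem.Dict.mk t).get? p.1 with _ | w
    · have hcf : (PySem.Dict.mk t).contains p.1 = false := by
        rw [PySem.Dict.contains_eq_isSome_get?, hg]; rfl
      have hval : (PySem.Dict.mk en).getD p.1 "" = p.2 :=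
        PySem.Dict.getD_of_mem_items _ (by exact hp) (by simpa [PySem.Dict.keys_mk] using hen) _
      simp [hcf, hval]
    · have hct : (PySem.Dict.mk t).contains p.1 = true := by
        rw [PySem.Dict.contains_eq_isSome_get?, hg]; rfl
      have hval : (PySem.Dict.mk t).getD p.1 "" = w :=
        PySem.Dict.getD_of_get?_eq_some _ _ hg
      simp [hct, hval]
  · show (0 : Int) + _ = _
    rw [Int.zero_add]
    congr 1
    rw [List.filter_map, List.length_map]
    congr 1
    refine List.filter_congr ?_
    intro kv _
    have h : ((PySem.Dict.mk t).contains kv.1) = ((List.map Prod.fst t).contains kv.1) := by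
      rw [PySem.Dict.contains_mk, Bool.eq_iff_iff]
      simp [List.any_eq_true, List.mem_map]
    simp [Function.comp, h]
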